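/- GENERATED by farm/mkstatement.py from design/units.tsv (unit `GifFreeExtensions.1`) and the assertions of Gif/Spec/Seg_GifFreeExtensions.lean — do not edit.
   THE STATEMENT of the proof unit `GifFreeExtensions.1`: segment 1 of `GifFreeExtensions` (19 instructions; entries 0x107da0;
   exits 0x107dd9,ret; ranges 0x107da0-0x107dc3,0x107e27-0x107e32)
   takes each of its entry assertions to one of its exit assertions (`Gif.Spec.GifFreeExtensions.Seg1`), given the contracts of its callees.
   What the names mean: ProgX/Base/Spec/Basic.lean (the shared hypotheses), Gif/Spec/Seg_GifFreeExtensions.lean (the assertions). The theorem to prove: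
   `theorem GifFreeExtensions_1_ok : Gif.Spec.GifFreeExtensions_1.Statement`. -/
import Gif.Code
import Gif.Dec.All
import Gif.Labels
import Gif.Spec.Seg_GifFreeExtensions
namespace Gif.Spec.GifFreeExtensions_1
open X86 X86.User Asan

/-- The statement of unit `GifFreeExtensions.1`. -/
def Statement : Prop :=
  ∀ (Lay : Layout) (_hLay : Lay.hi = 0x1000000) (μ : Microarch) (_hμ : UserX.MicroOK μ) (u₀ : State)
    (_hcode : HasCodeNat Lay u₀ Gif.L.GifFreeExtensions.entry Gif.Code.code_GifFreeExtensions.nat Gif.L.GifFreeExtensions.size)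
    (_h_asan_load8_noabort : Asan.SmallCheck Lay μ ProgX.Base.WayInv (ProgX.Base.CodeOK u₀) [.rax, .rcx, .rdx] 8 ProgX.Base.L.__asan_load8_noabort.entry),
    Gif.Spec.GifFreeExtensions.Seg1 Lay μ u₀

end Gif.Spec.GifFreeExtensions_1
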